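-- pv_equiv track=rewrite | github.com/chris-arsenault/advent-of-code-2025 | day2/main.py | generate_even_half
-- ===== SOURCE A (Python) =====
-- def generate_even_half(max_n: int) -> list[int]:
--     vals: list[int] = []
--     max_len = len(str(max_n))
--     for half_len in range(1, max_len // 2 + 1):
--         base = 10 ** (half_len - 1)
--         limit = 10**half_len
--         for t in range(base, limit):
--             n = t * (10**half_len) + t
--             if n > max_n:
--                 break
--             vals.append(n)
--     vals.sort()
--     return vals
-- ===== SOURCE B (Python) =====
-- def generate_even_half(max_n: int) -> list[int]:
--     # Single increasing loop: the doubled number t*(p+1), with p the power of ten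
--     # just above t (maintained arithmetically), is strictly increasing in t, so no
--     # sort is needed; t can never reach max_n before the break, hence the range bound.
--     vals: list[int] = []
--     p = 10  # the power of ten just above the current t
--     for t in range(1, max_n + 1):
--         if t == p:
--             p *= 10
--         n = t * (p + 1)
--         if n > max_n:
--             break
--         vals.append(n)
--     return vals
-- ===== Notes on version B (the rewrite author's own statement) =====
-- stated objective: simpler
-- what changed: Replaced the per-digit-length nested loops plus final sort by a single increasing loop over the half t that maintains the current power of ten for t's digit count arithmetically and breaks once the doubled number exceeds max_n; the output is emitted already sorted so the sort is dropped.
import Mathlib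
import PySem

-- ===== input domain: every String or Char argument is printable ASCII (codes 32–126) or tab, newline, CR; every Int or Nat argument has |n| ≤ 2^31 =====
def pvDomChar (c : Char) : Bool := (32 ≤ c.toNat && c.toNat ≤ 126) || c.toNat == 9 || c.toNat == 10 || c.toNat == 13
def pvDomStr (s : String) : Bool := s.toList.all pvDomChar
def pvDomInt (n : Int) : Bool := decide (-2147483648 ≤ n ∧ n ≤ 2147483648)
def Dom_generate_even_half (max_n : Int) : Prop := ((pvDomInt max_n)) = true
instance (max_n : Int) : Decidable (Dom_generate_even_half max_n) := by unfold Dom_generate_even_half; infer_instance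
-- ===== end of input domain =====

-- B replaces A's nested per-digit-length loops and final sort by one increasing loop over the
-- half t (maintaining p = 10^digits(t) arithmetically) that emits the values already sorted (simpler).

-- ===== PORT A =====
-- inner loop `for t in range(base, limit): n = t*10**half_len + t; if n > max_n: break; vals.append(n)`
def pvAInner (max_n : Int) (hl : Int) : List Int → List Int → List Int
  | vals, [] => vals
  | vals, t :: ts =>
    let n := t * (10:Int) ^ hl.toNat + t
    if n > max_n then vals else pvAInner max_n hl (vals ++ [n]) ts

def generate_even_half (max_n : Int) : List Int :=
  PySem.List.sorted
    ((PySem.List.pyRange 1 (PySem.Int.floordiv (PySem.Str.len (PySem.Int.toStr max_n)) 2 + 1) 1).foldl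
      (fun vals hl =>
        pvAInner max_n hl vals
          (PySem.List.pyRange ((10:Int) ^ (hl - 1).toNat) ((10:Int) ^ hl.toNat) 1))
      [])
    (fun x => x) false

-- ===== PORT B =====
-- the single loop `for t in range(1, max_n+1): if t == p: p *= 10; n = t*(p+1); if n > max_n: break; vals.append(n)`
def pvBLoop (max_n : Int) : List Int → Int → List Int → List Int
  | [], _, vals => vals
  | t :: ts, p, vals =>
    let p' := if t == p then p * 10 else p
    let n := t * (p' + 1)
    if n > max_n then vals else pvBLoop max_n ts p' (vals ++ [n])

def generate_even_half_alt (max_n : Int) : List Int :=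
  pvBLoop max_n (PySem.List.pyRange 1 (max_n + 1) 1) 10 []

-- ===== PRECONDITION & SPEC =====
def Spec_generate_even_half (max_n : Int) (out : List Int) : Prop := out = generate_even_half_alt max_n
instance (max_n : Int) (out : List Int) : Decidable (Spec_generate_even_half max_n out) := by unfold Spec_generate_even_half; infer_instance

-- ===== CLAIM (what is proved, stated in full; the proofs are below) =====
def Claim_equal_generate_even_half : Prop := ∀ (max_n : Int), Dom_generate_even_half max_n → Spec_generate_even_half max_n (generate_even_half max_n)

-- ===== LEMMAS AND PROOFS =====

-- digit-count bump: the exponent used at step t when the previous power is 10^k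
def pvBump (t : Int) (k : Nat) : Nat := if t = (10:Int) ^ k then k + 1 else k

theorem pvBump_ge (t : Int) (k : Nat) : k ≤ pvBump t k := by
  unfold pvBump; split <;> omega

theorem pvOne_le_pow (k : Nat) : (1:Int) ≤ (10:Int) ^ k := one_le_pow₀ (by norm_num)

-- the loop measure decreases while the guard holds
theorem pvMeasure_lt (m t : Int) (k : Nat) (hn : ¬ t * ((10:Int) ^ k + 1) > m) :
    (m + 1 - (t + 1)).toNat + (-(t + 1)).toNat < (m + 1 - t).toNat + (-t).toNat := by
  have hc := pvOne_le_pow k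
  rcases (by omega : 1 ≤ t ∨ t = 0 ∨ t < 0) with ht | ht | ht
  · have h2 : 2 * t ≤ t * ((10:Int) ^ k + 1) := by nlinarith
    omega
  · subst ht
    simp only [zero_mul, gt_iff_lt, not_lt] at hn
    omega
  · omega

-- once t passes max_n the guard fails
theorem pvBreak (m t : Int) (k : Nat) (ht0 : 0 ≤ t) (htm : m + 1 ≤ t) :
    t * ((10:Int) ^ k + 1) > m := by
  have hc := pvOne_le_pow k
  nlinarith

-- Reference walker: both programs produce `pvRef m 1 1`.
def pvRef (m t : Int) (k : Nat) : List Int :=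
  if t * ((10:Int) ^ pvBump t k + 1) > m then []
  else t * ((10:Int) ^ pvBump t k + 1) :: pvRef m (t + 1) (pvBump t k)
termination_by ((m + 1 - t).toNat + (-t).toNat)
decreasing_by exact pvMeasure_lt m t (pvBump t k) (by assumption)

theorem pvRef_ge (m : Int) : ∀ (N : Nat) (t : Int) (k : Nat) (x : Int),
    (m + 1 - t).toNat + (-t).toNat ≤ N → x ∈ pvRef m t k → t * ((10:Int) ^ k + 1) ≤ x := by
  intro N
  induction N with
  | zero =>
    intro t k x hN hx
    rw [pvRef.eq_def] at hx
    by_cases hn : t * ((10:Int) ^ pvBump t k + 1) > m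
    · rw [if_pos hn] at hx
      simp at hx
    · exfalso
      exact hn (pvBreak m t (pvBump t k) (by omega) (by omega))
  | succ N ih =>
    intro t k x hN hx
    rw [pvRef.eq_def] at hx
    by_cases hn : t * ((10:Int) ^ pvBump t k + 1) > m
    · rw [if_pos hn] at hx
      simp at hx
    · rw [if_neg hn] at hx
      have hpow : (10:Int) ^ k ≤ (10:Int) ^ pvBump t k :=
        pow_le_pow_right₀ (by norm_num) (pvBump_ge t k)
      have hmeas := pvMeasure_lt m t (pvBump t k) hn
      rcases List.mem_cons.mp hx with hx | hx
      · subst hx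
        by_cases hteq : t = (10:Int) ^ k
        · have ht1 : (1:Int) ≤ t := by
            have := pvOne_le_pow k; omega
          nlinarith
        · have : pvBump t k = k := if_neg hteq
          rw [this]
      · have hrec := ih (t + 1) (pvBump t k) x (by omega) hx
        by_cases hteq : t = (10:Int) ^ k
        · have ht1 : (1:Int) ≤ t := by
            have := pvOne_le_pow k; omega
          have hc := pvOne_le_pow (pvBump t k)
          nlinarith
        · have hkk : pvBump t k = k := if_neg hteq
          rw [hkk] at hrec
          have hc := pvOne_le_pow k
          nlinarith

theorem pvRef_pairwise (m : Int) : ∀ (N : Nat) (t : Int) (k : Nat),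
    (m + 1 - t).toNat + (-t).toNat ≤ N → (pvRef m t k).Pairwise (· < ·) := by
  intro N
  induction N with
  | zero =>
    intro t k hN
    rw [pvRef.eq_def]
    by_cases hn : t * ((10:Int) ^ pvBump t k + 1) > m
    · rw [if_pos hn]
      exact List.Pairwise.nil
    · exact absurd (pvBreak m t (pvBump t k) (by omega) (by omega)) hn
  | succ N ih =>
    intro t k hN
    rw [pvRef.eq_def]
    by_cases hn : t * ((10:Int) ^ pvBump t k + 1) > m
    · rw [if_pos hn]
      exact List.Pairwise.nil
    · rw [if_neg hn]
      have hmeas := pvMeasure_lt m t (pvBump t k) hn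
      refine List.Pairwise.cons ?_ (ih (t + 1) (pvBump t k) (by omega))
      intro x hx
      have hrec := pvRef_ge m N (t + 1) (pvBump t k) x (by omega) hx
      have hc := pvOne_le_pow (pvBump t k)
      nlinarith

theorem pvBLoop_eq_ref (m : Int) : ∀ (N : Nat) (t : Int) (k : Nat) (vals : List Int),
    (m + 1 - t).toNat ≤ N → 1 ≤ t →
    pvBLoop m (PySem.List.pyRange t (m + 1) 1) ((10:Int) ^ k) vals = vals ++ pvRef m t k := by
  intro N
  induction N with
  | zero =>
    intro t k vals hN ht
    rw [PySem.List.pyRange_one_eq_nil (by omega)]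
    rw [pvRef.eq_def, if_pos (pvBreak m t (pvBump t k) (by omega) (by omega))]
    simp [pvBLoop]
  | succ N ih =>
    intro t k vals hN ht
    by_cases hend : m + 1 ≤ t
    · rw [PySem.List.pyRange_one_eq_nil (by omega)]
      rw [pvRef.eq_def, if_pos (pvBreak m t (pvBump t k) (by omega) (by omega))]
      simp [pvBLoop]
    · rw [PySem.List.pyRange_one_cons (by omega : t < m + 1)]
      rw [pvRef.eq_def]
      simp only [pvBLoop]
      have hp' : (if (t == (10:Int) ^ k) = true then (10:Int) ^ k * 10 else (10:Int) ^ k)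
          = (10:Int) ^ pvBump t k := by
        unfold pvBump
        by_cases h : t = (10:Int) ^ k
        · simp [h, pow_succ]
        · simp [h]
      rw [hp']
      by_cases hn : t * ((10:Int) ^ pvBump t k + 1) > m
      · rw [if_pos hn, if_pos hn, List.append_nil]
      · rw [if_neg hn, if_neg hn]
        rw [ih (t + 1) (pvBump t k) (vals ++ [t * ((10:Int) ^ pvBump t k + 1)]) (by omega) (by omega)]
        simp

-- proof-only name for A's outer-loop body
def pvStep (m : Int) (vals : List Int) (hl : Int) : List Int :=
  pvAInner m hl vals (PySem.List.pyRange ((10:Int) ^ (hl - 1).toNat) ((10:Int) ^ hl.toNat) 1)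

theorem pvFoldl_id (m : Int) (k : Nat) (hm : m < (10:Int) ^ (2 * k + 1)) :
    ∀ (l : List Int) (vals : List Int), (∀ hl ∈ l, (k:Int) + 1 ≤ hl) →
    l.foldl (pvStep m) vals = vals := by
  intro l
  induction l with
  | nil => intro vals _; rfl
  | cons hl tl ih =>
    intro vals hmem
    have hhl : (k:Int) + 1 ≤ hl := hmem hl (List.mem_cons_self)
    have hblk : (10:Int) ^ (hl - 1).toNat < (10:Int) ^ hl.toNat :=
      pow_lt_pow_right₀ (by norm_num) (by omega)
    simp only [List.foldl_cons]
    have hstep : pvStep m vals hl = vals := by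
      unfold pvStep
      rw [PySem.List.pyRange_one_cons hblk]
      simp only [pvAInner]
      have hbig : (10:Int) ^ (hl - 1).toNat * (10:Int) ^ hl.toNat + (10:Int) ^ (hl - 1).toNat > m := by
        have h1 : (10:Int) ^ (2 * k + 1) ≤ (10:Int) ^ (hl - 1).toNat * (10:Int) ^ hl.toNat := by
          rw [← pow_add]
          exact pow_le_pow_right₀ (by norm_num) (by omega)
        have h2 : (0:Int) < (10:Int) ^ (hl - 1).toNat := by positivity
        omega
      rw [if_pos hbig]
    rw [hstep]
    exact ih vals (fun x hx => hmem x (List.mem_cons_of_mem _ hx))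

theorem pvRef_bump (m s : Int) (k : Nat) (hs : s = (10:Int) ^ k) :
    pvRef m s k = pvRef m s (k + 1) := by
  conv_lhs => rw [pvRef.eq_def]
  conv_rhs => rw [pvRef.eq_def]
  have h1 : pvBump s k = k + 1 := if_pos hs
  have h2 : pvBump s (k + 1) = k + 1 := by
    apply if_neg
    rw [hs]
    exact ne_of_lt (pow_lt_pow_right₀ (by norm_num) (by omega))
  rw [h1, h2]

theorem pvA_eq_ref (m : Int) (D : Int) (hD0 : 0 ≤ D) (hm : m < (10:Int) ^ (2 * D.toNat + 1)) :
    ∀ (N : Nat) (k : Nat) (s : Int) (vals : List Int),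
    (D.toNat + 2 - k) + (m + 2 - s).toNat ≤ N →
    1 ≤ k → k ≤ D.toNat + 1 →
    (10:Int) ^ (k - 1) ≤ s → s ≤ (10:Int) ^ k →
    (PySem.List.pyRange ((k:Int) + 1) (D + 1) 1).foldl (pvStep m)
      (pvAInner m (k:Int) vals (PySem.List.pyRange s ((10:Int) ^ k) 1))
    = vals ++ pvRef m s k := by
  intro N
  induction N with
  | zero => intro k s vals hN hk1 hkD hs1 hs2; omega
  | succ N ih =>
    intro k s vals hN hk1 hkD hs1 hs2
    have hDcast : ((D.toNat : Int)) = D := Int.toNat_of_nonneg hD0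
    by_cases hs : s = (10:Int) ^ k
    · rw [PySem.List.pyRange_one_eq_nil (le_of_eq hs.symm)]
      simp only [pvAInner]
      by_cases hk : (k:Int) + 1 < D + 1
      · rw [PySem.List.pyRange_one_cons hk]
        simp only [List.foldl_cons]
        have hstep : pvStep m vals ((k:Int) + 1)
            = pvAInner m ((k:Int) + 1) vals
                (PySem.List.pyRange s ((10:Int) ^ (k + 1)) 1) := by
          unfold pvStep
          have e1 : (((k:Int) + 1) - 1).toNat = k := by omega
          have e2 : ((k:Int) + 1).toNat = k + 1 := by omega
          rw [e1, e2, ← hs]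
        rw [hstep]
        have hrec := ih (k + 1) s vals (by omega) (by omega) (by omega)
          (by simpa using le_of_eq hs.symm)
          (by rw [hs]; exact le_of_lt (pow_lt_pow_right₀ (by norm_num) (by omega)))
        push_cast at hrec
        rw [hrec]
        rw [pvRef_bump m s k hs]
      · rw [not_lt] at hk
        rw [PySem.List.pyRange_one_eq_nil (by omega)]
        simp only [List.foldl_nil]
        rw [pvRef.eq_def]
        have h1 : pvBump s k = k + 1 := if_pos hs
        rw [h1]
        have hbig : s * ((10:Int) ^ (k + 1) + 1) > m := by
          have hkD' : D.toNat ≤ k := by omega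
          have h2 : (10:Int) ^ (2 * D.toNat + 1) ≤ (10:Int) ^ k * (10:Int) ^ (k + 1) := by
            rw [← pow_add]
            exact pow_le_pow_right₀ (by norm_num) (by omega)
          have h4 : (0:Int) < (10:Int) ^ k := by positivity
          have hexp : (10:Int) ^ k * ((10:Int) ^ (k + 1) + 1) = (10:Int) ^ k * (10:Int) ^ (k + 1) + (10:Int) ^ k := by ring
          rw [hs, hexp]
          omega
        rw [if_pos hbig, List.append_nil]
    · have hslt : s < (10:Int) ^ k := lt_of_le_of_ne hs2 hs
      rw [PySem.List.pyRange_one_cons hslt]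
      simp only [pvAInner]
      have etn : ((k:Int)).toNat = k := by omega
      rw [etn]
      rw [pvRef.eq_def]
      have h1 : pvBump s k = k := if_neg hs
      rw [h1]
      have heq : s * ((10:Int) ^ k + 1) = s * (10:Int) ^ k + s := by ring
      rw [heq]
      have hspos : (1:Int) ≤ s := by
        have := pvOne_le_pow (k - 1); omega
      by_cases hn : s * (10:Int) ^ k + s > m
      · rw [if_pos hn, if_pos hn]
        have hmk : m < (10:Int) ^ (2 * k + 1) := by
          have h3 : (0:Int) < (10:Int) ^ k := by positivity
          have h2 : s * (10:Int) ^ k + s ≤ (10:Int) ^ k * (10:Int) ^ k + (10:Int) ^ k := by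
            nlinarith
          have h4 : (10:Int) ^ k * (10:Int) ^ k + (10:Int) ^ k ≤ (10:Int) ^ (2 * k + 1) := by
            have e : (10:Int) ^ (2 * k + 1) = (10:Int) ^ k * (10:Int) ^ k * 10 := by
              rw [show 2 * k + 1 = k + k + 1 by ring, pow_add, pow_add]; ring
            nlinarith
          omega
        rw [pvFoldl_id m k hmk _ vals
          (fun hl hhl => (PySem.List.mem_pyRange_one.mp hhl).1)]
        simp
      · rw [if_neg hn, if_neg hn]
        have h3 : (0:Int) < (10:Int) ^ k := by positivity
        have hsm : s + 1 ≤ m := by nlinarith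
        have hrec := ih k (s + 1) (vals ++ [s * (10:Int) ^ k + s])
          (by omega) hk1 hkD (by omega) (by omega)
        rw [hrec]
        simp

theorem pvToDigitsCore_lt : ∀ (f n : Nat), n < f → n < 10 ^ (Nat.toDigitsCore 10 f n []).length := by
  intro f
  induction f with
  | zero => intro n h; omega
  | succ f ih =>
    intro n h
    simp only [Nat.toDigitsCore]
    by_cases h0 : n / 10 = 0
    · rw [if_pos h0]
      simp
      omega
    · rw [if_neg h0]
      rw [Nat.toDigitsCore_lens_eq]
      have hih := ih (n / 10) (by omega)
      set P := 10 ^ (Nat.toDigitsCore 10 f (n / 10) []).length with hP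
      rw [pow_succ]
      omega

theorem pvLt_pow_len (m : Int) : m < (10:Int) ^ (PySem.Int.toChars m).length := by
  by_cases hm : m < 0
  · have : (0:Int) < (10:Int) ^ (PySem.Int.toChars m).length := by positivity
    omega
  · rw [not_lt] at hm
    unfold PySem.Int.toChars
    rw [if_neg (by omega)]
    unfold Nat.toDigits
    have h := pvToDigitsCore_lt (m.toNat + 1) m.toNat (by omega)
    have h2 : ((m.toNat : Int)) < (((10:Nat) ^ (Nat.toDigitsCore 10 (m.toNat + 1) m.toNat []).length : Nat) : Int) := by
      exact_mod_cast h
    push_cast at h2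
    omega

-- ===== VERDICT (by name: the statement is the Claim_ definition above) =====
theorem generate_even_half_spec : Claim_equal_generate_even_half := by
  intro m _
  show generate_even_half m = generate_even_half_alt m
  have hlen : PySem.Str.len (PySem.Int.toStr m) = ((PySem.Int.toChars m).length : Int) := by
    simp [PySem.Str.len, PySem.Int.toList_toStr]
  set L : Nat := (PySem.Int.toChars m).length with hL
  have hfd : PySem.Int.floordiv ((L:Int)) 2 = (L:Int) / 2 := by
    unfold PySem.Int.floordiv
    norm_num [Int.fdiv_eq_ediv]
  have hD0 : (0:Int) ≤ (L:Int) / 2 := by positivity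
  have hmD : m < (10:Int) ^ (2 * ((L:Int) / 2).toNat + 1) := by
    have h1 : m < (10:Int) ^ L := pvLt_pow_len m
    have h2 : (10:Int) ^ L ≤ (10:Int) ^ (2 * ((L:Int) / 2).toNat + 1) := by
      apply pow_le_pow_right₀ (by norm_num)
      omega
    omega
  have hB : generate_even_half_alt m = pvRef m 1 1 := by
    unfold generate_even_half_alt
    rw [show (10:Int) = (10:Int) ^ 1 from (pow_one _).symm]
    rw [pvBLoop_eq_ref m m.toNat 1 1 [] (by omega) (by omega)]
    simp
  have hA : generate_even_half m = PySem.List.sorted (pvRef m 1 1) (fun x => x) false := by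
    unfold generate_even_half
    rw [hlen, hfd]
    have hfun : (fun (vals : List Int) (hl : Int) =>
        pvAInner m hl vals
          (PySem.List.pyRange ((10:Int) ^ (hl - 1).toNat) ((10:Int) ^ hl.toNat) 1)) = pvStep m := by
      funext vals hl; rfl
    rw [hfun]
    by_cases hD1 : 1 ≤ (L:Int) / 2
    · rw [PySem.List.pyRange_one_cons (by omega : (1:Int) < (L:Int) / 2 + 1)]
      simp only [List.foldl_cons]
      have hstep : pvStep m [] 1
          = pvAInner m ((1:Int)) [] (PySem.List.pyRange 1 ((10:Int) ^ 1) 1) := by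
        unfold pvStep
        norm_num
      rw [hstep]
      have hrec := pvA_eq_ref m ((L:Int) / 2) hD0 hmD
        (((L:Int) / 2).toNat + 2 - 1 + (m + 2 - 1).toNat) 1 1 []
        (by omega) (by omega) (by omega) (by norm_num) (by norm_num)
      push_cast at hrec
      rw [show ((10:Int) ^ 1) = 10 from pow_one _, show (1:Int) + 1 = 2 from by norm_num]
      rw [hrec]
      simp
    · have hDz : (L:Int) / 2 = 0 := by omega
      rw [hDz]
      rw [PySem.List.pyRange_one_eq_nil (by norm_num)]
      simp only [List.foldl_nil]
      have hm10 : m < 10 := by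
        rw [hDz] at hmD
        simpa using hmD
      rw [pvRef.eq_def]
      have h1 : pvBump 1 1 = 1 := by unfold pvBump; norm_num
      rw [h1]
      rw [if_pos (by norm_num; omega : (1:Int) * ((10:Int) ^ 1 + 1) > m)]
  rw [hA, hB]
  exact PySem.List.sorted_eq_of_perm_of_pairwise_lt _ _ _ (List.Perm.refl _)
    (pvRef_pairwise m m.toNat 1 1 (by omega))
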